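-- pv_equiv track=rewrite | github.com/predicateacademy/physical-computing | lightshow/lightshow_patterns.py | fill_left
-- ===== SOURCE A (Python) =====
-- def off(led):
-- 	patterns = []
-- 	pattern = ''
-- 	for x in range(len(led)):
-- 		pattern += '0'
-- 	patterns.append(pattern)
-- 	return patterns
--
-- def on(led):
-- 	patterns = []
-- 	pattern = ''
-- 	for x in range(len(led)):
-- 		pattern += '1'
-- 	patterns.append(pattern)
-- 	return patterns
--
-- def fill_left(led):
--    patterns = []
--    for x in range(len(led)):
--       l = off(led)
--       for item in l:
--          for idx in range(x):
--             tlist = list(item)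
--             tlist[idx] = '1'
--             item = ''.join(tlist)
--          patterns.append(item)
--    patterns.extend(on(led))
--    return patterns
-- ===== SOURCE B (Python) =====
-- def fill_left(led):
--     cur = ['0'] * len(led)
--     patterns = [''.join(cur)]
--     for i in range(len(led)):
--         cur[i] = '1'
--         patterns.append(''.join(cur))
--     return patterns
-- ===== Notes on version B (the rewrite author's own statement) =====
-- stated objective: faster
-- what changed: B keeps one mutable char buffer, flipping position i to '1' and joining once per step, instead of A's rebuild-from-all-zeros with x list/join round-trips per pattern.
import Mathlib
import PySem

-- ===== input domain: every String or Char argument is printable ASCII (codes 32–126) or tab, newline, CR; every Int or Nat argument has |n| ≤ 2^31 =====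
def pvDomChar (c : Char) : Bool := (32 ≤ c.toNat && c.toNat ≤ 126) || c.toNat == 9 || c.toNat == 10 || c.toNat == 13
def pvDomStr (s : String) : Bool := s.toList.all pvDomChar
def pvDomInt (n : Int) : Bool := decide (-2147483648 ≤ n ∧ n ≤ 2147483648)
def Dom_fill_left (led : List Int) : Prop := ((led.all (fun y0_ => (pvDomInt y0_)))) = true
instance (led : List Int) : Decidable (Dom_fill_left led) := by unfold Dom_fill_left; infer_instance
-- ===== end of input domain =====

-- B replaces A's rebuild-from-zeros-with-x-flips nested loops by one running buffer flipped
-- left to right, one join per pattern (objective: faster).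
-- Strings are handled on the List Char side (''.join/list() are the String.ofList/String.toList
-- identities), which is exact here.

-- ===== PORT A =====
def pvOff (led : List Int) : List String :=
  [String.ofList ((List.range led.length).foldl (fun p _ => p ++ ['0']) [])]

def pvOn (led : List Int) : List String :=
  [String.ofList ((List.range led.length).foldl (fun p _ => p ++ ['1']) [])]

def fill_left (led : List Int) : List String :=
  (List.range led.length).foldl (fun patterns x =>
    (pvOff led).foldl (fun patterns item =>
      -- for idx in range(x): tlist = list(item); tlist[idx] = '1'; item = ''.join(tlist)
      -- (idx < x ≤ len(item), so the Python setitem never raises)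
      patterns ++ [(List.range x).foldl (fun it idx => String.ofList (it.toList.set idx '1')) item])
      patterns) []
  ++ pvOn led

-- ===== PORT B =====
-- loop body of B: cur[i] = '1'; patterns.append(''.join(cur))
def pvStep (s : List Char × List String) (i : Nat) : List Char × List String :=
  let cur := s.1.set i '1'
  (cur, s.2 ++ [String.ofList cur])

def fill_left_alt (led : List Int) : List String :=
  ((List.range led.length).foldl pvStep
    (List.replicate led.length '0', [String.ofList (List.replicate led.length '0')])).2

-- ===== PRECONDITION & SPEC =====
def Spec_fill_left (led : List Int) (out : List String) : Prop := out = fill_left_alt led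
instance (led : List Int) (out : List String) : Decidable (Spec_fill_left led out) := by unfold Spec_fill_left; infer_instance

-- ===== CLAIM (what is proved, stated in full; the proofs are below) =====
def Claim_equal_fill_left : Prop := ∀ (led : List Int), Dom_fill_left led → Spec_fill_left led (fill_left led)

-- ===== LEMMAS AND PROOFS =====

/-- the x-th pattern: x ones then n-x zeros -/
def pvPat (n x : Nat) : List Char := List.replicate x '1' ++ List.replicate (n - x) '0'

lemma pv_pat_succ (n x : Nat) : pvPat (n + 1) (x + 1) = '1' :: pvPat n x := by
  simp [pvPat, List.replicate_succ]

lemma pv_set_pat (n x : Nat) (h : x < n) : (pvPat n x).set x '1' = pvPat n (x + 1) := by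
  induction x generalizing n with
  | zero =>
    obtain ⟨m, rfl⟩ : ∃ m, n = m + 1 := ⟨n - 1, by omega⟩
    simp [pvPat, List.replicate_succ]
  | succ k ih =>
    obtain ⟨m, rfl⟩ : ∃ m, n = m + 1 := ⟨n - 1, by omega⟩
    rw [pv_pat_succ, pv_pat_succ, List.set_cons_succ, ih m (by omega)]

lemma pv_inner (n x : Nat) (h : x ≤ n) :
    (List.range x).foldl (fun it idx => String.ofList (it.toList.set idx '1'))
        (String.ofList (pvPat n 0))
      = String.ofList (pvPat n x) := by
  induction x with
  | zero => rfl
  | succ k ih =>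
    rw [List.range_succ, List.foldl_append, ih (by omega)]
    simp [String.toList_ofList, pv_set_pat n k (by omega)]

lemma pv_A_closed (led : List Int) :
    fill_left led
      = (List.range led.length).map (fun x => String.ofList (pvPat led.length x))
          ++ [String.ofList (pvPat led.length led.length)] := by
  set n := led.length with hn
  have hoff : pvOff led = [String.ofList (pvPat n 0)] := by
    simp [pvOff, pvPat, hn]
  have hon : pvOn led = [String.ofList (pvPat n n)] := by
    simp [pvOn, pvPat, hn]
  unfold fill_left
  rw [← hn, hoff, hon]
  congr 1
  calc (List.range n).foldl (fun patterns x =>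
          [String.ofList (pvPat n 0)].foldl (fun patterns item =>
            patterns ++ [(List.range x).foldl
              (fun it idx => String.ofList (it.toList.set idx '1')) item]) patterns) []
      = (List.range n).foldl (fun patterns x =>
          patterns ++ [String.ofList (pvPat n x)]) [] := by
        apply PySem.List.foldl_congr_mem
        intro acc x hx
        simp only [List.foldl]
        rw [pv_inner n x (Nat.le_of_lt (List.mem_range.mp hx))]
    _ = (List.range n).map (fun x => String.ofList (pvPat n x)) := by
        rw [PySem.List.foldl_append_singleton_eq_map]
        simp

lemma pv_B_inv (n i : Nat) (h : i ≤ n) :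
    (List.range i).foldl pvStep
      (List.replicate n '0', [String.ofList (List.replicate n '0')])
    = (pvPat n i, (List.range (i + 1)).map (fun x => String.ofList (pvPat n x))) := by
  induction i with
  | zero => simp [pvPat]
  | succ k ih =>
    rw [List.range_succ, List.foldl_append, ih (by omega)]
    simp [pvStep, pv_set_pat n k (by omega), List.range_succ (n := k + 1)]

lemma pv_B_closed (led : List Int) :
    fill_left_alt led
      = (List.range led.length).map (fun x => String.ofList (pvPat led.length x))
          ++ [String.ofList (pvPat led.length led.length)] := by
  unfold fill_left_alt
  rw [pv_B_inv led.length led.length (le_refl _)]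
  rw [List.range_succ, List.map_append]
  simp

-- ===== VERDICT (by name: the statement is the Claim_ definition above) =====
theorem fill_left_spec : Claim_equal_fill_left := by
  intro led _
  unfold Spec_fill_left
  rw [pv_A_closed, pv_B_closed]
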